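-- pv_equiv track=rewrite | github.com/jbalmonte1/PythonProjects | CodilityExercises/TapeEquilibrium.py | solution
-- ===== SOURCE A (Python) =====
-- def solution(A):
--     resultingList = []
--     for i in range(len(A)):
--         a1 = A[:i]
--         a2 = A[i:]
--         suma1 = sum(a1)
--         suma2 = sum(a2)
--         diff = abs(suma1 - suma2)
--
--         resultingList.append(diff)
--
--     return min(resultingList)
-- ===== SOURCE B (Python) =====
-- def solution(A):
--     total = sum(A)
--     best = abs(total)  # split at i = 0
--     prefix = 0
--     for x in A[:-1]:
--         prefix += x
--         d = abs(2 * prefix - total)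
--         if d < best:
--             best = d
--     return best
-- ===== Notes on version B (the rewrite author's own statement) =====
-- stated objective: faster
-- what changed: Replaces the quadratic loop that re-slices and re-sums the list at every split point with a single pass maintaining a running prefix sum and the running minimum of |2*prefix - total|.
import Mathlib
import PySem

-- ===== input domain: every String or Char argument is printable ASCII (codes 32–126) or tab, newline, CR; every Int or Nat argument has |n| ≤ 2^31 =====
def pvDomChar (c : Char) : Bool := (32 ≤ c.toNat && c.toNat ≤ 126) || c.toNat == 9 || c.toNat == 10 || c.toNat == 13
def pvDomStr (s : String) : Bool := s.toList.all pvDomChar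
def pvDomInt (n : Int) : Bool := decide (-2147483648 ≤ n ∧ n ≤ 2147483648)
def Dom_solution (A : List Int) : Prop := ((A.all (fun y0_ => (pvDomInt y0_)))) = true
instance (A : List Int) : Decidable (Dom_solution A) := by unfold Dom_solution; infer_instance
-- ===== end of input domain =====

-- B replaces A's quadratic re-slice-and-re-sum over every split point with a single
-- prefix-sum pass keeping the running minimum of |2*prefix - total| (objective: faster).


-- ===== PORT A =====
def solution (A : List Int) : Int :=
  let resultingList :=
    (PySem.List.pyRange 0 A.length 1).foldl (fun acc i =>
      let a1 := PySem.List.slice A none (some i)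
      let a2 := PySem.List.slice A (some i) none
      let suma1 := a1.sum
      let suma2 := a2.sum
      let diff := |suma1 - suma2|
      acc ++ [diff]) []
  (PySem.List.min? resultingList (fun y => y)).getD 0   -- min([]) raises: excluded by Pre_

-- ===== PORT B =====
def solution_alt (A : List Int) : Int :=
  let total := A.sum
  ((PySem.List.slice A none (some (-1))).foldl
    (fun (s : Int × Int) x =>
      let p := s.1 + x
      let d := |2 * p - total|
      (p, if d < s.2 then d else s.2))
    (0, |total|)).2

-- ===== PRECONDITION & SPEC =====
-- Pre_ excludes only the empty list, on which Python A raises ValueError (min of an empty sequence).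
def Pre_solution (A : List Int) : Prop := A ≠ []
instance (A : List Int) : Decidable (Pre_solution A) := by unfold Pre_solution; infer_instance
def pvWitness_solution : List Int := ([3, 1, 2, 4, 3])

def Spec_solution (A : List Int) (out : Int) : Prop := out = solution_alt A
instance (A : List Int) (out : Int) : Decidable (Spec_solution A out) := by unfold Spec_solution; infer_instance

-- ===== CLAIM (what is proved, stated in full; the proofs are below) =====
def Claim_equal_solution : Prop := ∀ (A : List Int), Dom_solution A → Pre_solution A → Spec_solution A (solution A)

-- ===== LEMMAS AND PROOFS =====

-- the split-point difference: |2 * (sum of the first k elements) - total|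
def pvF (A : List Int) (k : Nat) : Int := |2 * (A.take k).sum - A.sum|

lemma pvDrop_sum (A : List Int) (k : Nat) : (A.drop k).sum = A.sum - (A.take k).sum := by
  have := List.sum_take_add_sum_drop A k
  omega

lemma pvA_list (A : List Int) :
    (PySem.List.pyRange 0 A.length 1).foldl (fun acc i =>
      acc ++ [|(PySem.List.slice A none (some i)).sum - (PySem.List.slice A (some i) none).sum|]) []
    = (List.range A.length).map (pvF A) := by
  rw [PySem.List.foldl_append_singleton_eq_map, PySem.List.pyRange_one, List.map_map]
  simp only [List.nil_append]
  apply List.map_congr_left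
  intro k hk
  simp only [Function.comp_apply, zero_add]
  rw [PySem.List.slice_to_natCast, PySem.List.slice_from_natCast, pvDrop_sum, pvF]
  congr 1
  ring

lemma pvB_fold (total : Int) (xs : List Int) : ∀ (p0 b0 : Int),
    (xs.foldl (fun (s : Int × Int) x =>
        (s.1 + x, if |2 * (s.1 + x) - total| < s.2 then |2 * (s.1 + x) - total| else s.2))
      (p0, b0)).2
    = ((List.range xs.length).map (fun k => |2 * (p0 + (xs.take (k+1)).sum) - total|)).foldl min b0 := by
  induction xs with
  | nil => intro p0 b0; simp
  | cons x t ih =>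
    intro p0 b0
    simp only [List.foldl_cons, List.length_cons, List.range_succ_eq_map, List.map_cons,
      List.map_map, List.take_succ_cons]
    rw [ih]
    congr 1
    · simp only [List.take_zero, List.sum_cons, List.sum_nil, add_zero]
      rw [Int.min_def]
      split_ifs <;> omega
    · apply List.map_congr_left
      intro k _
      simp only [Function.comp_apply, List.sum_cons]
      congr 1
      ring

lemma pvTake_dropLast (A : List Int) (k : Nat) (hk : k + 1 ≤ A.length - 1) :
    (A.dropLast.take (k+1)).sum = (A.take (k+1)).sum := by
  rw [List.dropLast_eq_take, List.take_take]
  rw [Nat.min_eq_left hk]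

-- ===== VERDICT (by name: the statement is the Claim_ definition above) =====
theorem solution_spec : Claim_equal_solution := by
  intro A _ hpre
  unfold Spec_solution solution solution_alt
  simp only []
  rw [pvA_list, PySem.List.slice_to_neg_one]
  obtain ⟨a, t, rfl⟩ : ∃ a t, A = a :: t := by
    cases A with
    | nil => exact absurd rfl hpre
    | cons a t => exact ⟨a, t, rfl⟩
  rw [pvB_fold]
  simp only [List.length_cons, List.range_succ_eq_map, List.map_cons, List.map_map,
    PySem.List.min?_id_cons, Option.getD_some, List.length_dropLast, Nat.add_sub_cancel]
  have hf0 : pvF (a :: t) 0 = |(a :: t).sum| := by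
    simp only [pvF, List.take_zero, List.sum_nil, mul_zero, zero_sub, abs_neg]
  have hmap : (List.range t.length).map
        (fun k => |2 * (0 + ((a :: t).dropLast.take (k+1)).sum) - (a :: t).sum|)
      = (List.range t.length).map (pvF (a :: t) ∘ Nat.succ) := by
    apply List.map_congr_left
    intro k hk
    have hk' : k + 1 ≤ (a :: t).length - 1 := by
      simp only [List.length_cons, Nat.add_sub_cancel]
      exact Nat.succ_le_of_lt (List.mem_range.mp hk)
    simp only [Function.comp_apply, zero_add, pvTake_dropLast _ _ hk', pvF]
  rw [hf0, hmap]
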